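-- pv_equiv track=rewrite | github.com/isjuye/server-status_PWN | server-status_PWN.py | group_urls_by_path
-- ===== SOURCE A (Python) =====
-- def group_urls_by_path(urls):
--     """Group URLs by their path structure"""
--     groups = {}
--     for url in urls:
--         # Get path without query string
--         base_path = url.split('?')[0] if '?' in url else url
--         # Get the first two path components for grouping
--         path_parts = [p for p in base_path.split('/') if p][:2]
--         if path_parts:
--             group_key = f"/{'/'.join(path_parts)}"
--         else:
--             group_key = "/"
--
--         if group_key not in groups:
--             groups[group_key] = set()
--         groups[group_key].add(url)
--     return groups
-- ===== SOURCE B (Python) =====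
-- def group_urls_by_path(urls):
--     """Group URLs by their path structure"""
--     def key(url):
--         base = url.split('?')[0] if '?' in url else url
--         parts = [p for p in base.split('/') if p][:2]
--         return '/' + '/'.join(parts) if parts else '/'
--     keyed = [(key(u), u) for u in urls]
--     seen = []
--     for k, _ in keyed:
--         if k not in seen:
--             seen.append(k)
--     return {k: {u for kk, u in keyed if kk == k} for k in seen}
-- ===== Notes on version B (the rewrite author's own statement) =====
-- stated objective: alternative
-- what changed: B drops A's incremental dict-of-sets bucketing entirely: it pairs each url with its key once, collects the distinct keys in first-appearance order, then builds each group in a nested second pass by filtering the whole keyed list for that key (distinct-keys-then-filter instead of single-pass dict insertion).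
import Mathlib
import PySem

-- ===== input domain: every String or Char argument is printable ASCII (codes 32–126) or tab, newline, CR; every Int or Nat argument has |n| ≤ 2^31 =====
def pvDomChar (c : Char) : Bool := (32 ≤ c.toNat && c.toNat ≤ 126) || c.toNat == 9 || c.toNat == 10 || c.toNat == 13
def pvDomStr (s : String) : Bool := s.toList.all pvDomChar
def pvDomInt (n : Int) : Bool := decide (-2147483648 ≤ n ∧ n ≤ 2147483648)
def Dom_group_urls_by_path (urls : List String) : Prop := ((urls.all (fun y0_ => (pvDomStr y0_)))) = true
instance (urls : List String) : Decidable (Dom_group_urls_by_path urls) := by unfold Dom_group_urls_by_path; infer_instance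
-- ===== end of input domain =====

-- B drops A's incremental dict-of-sets bucketing: it collects the distinct keys in
-- first-appearance order, then builds each group by filtering the whole url list for that key.

-- shared key helper: the grouping key, identical in Source A's loop body and Source B's `key`
def pvKey (url : String) : String :=
  let base := if PySem.Str.isIn "?" url then (((PySem.Str.split? url "?").getD []).headD "") else url
  let parts := (((PySem.Str.split? base "/").getD []).filter (fun p => p != "")).take 2
  if parts == [] then "/" else "/" ++ PySem.Str.join "/" parts

-- ===== PORT A =====
-- loop body of A's `for url in urls`
def pvGroupsStep (d : PySem.Dict String (PySem.Set String)) (url : String) :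
    PySem.Dict String (PySem.Set String) :=
  let group_key := pvKey url
  let d1 := if d.contains group_key then d else d.insert group_key PySem.Set.empty
  d1.modify group_key PySem.Set.empty (fun s => PySem.Set.add s url)

def group_urls_by_path (urls : List String) : List (String × List String) :=
  (urls.foldl pvGroupsStep PySem.Dict.empty).items

-- ===== PORT B =====
def group_urls_by_path_alt (urls : List String) : List (String × List String) :=
  -- Source B: keyed = [(key(u), u) for u in urls]
  let keyed := urls.map (fun u => (pvKey u, u))
  -- Source B: seen = []; for k, _ in keyed: if k not in seen: seen.append(k)
  let seen := keyed.foldl (fun (s : PySem.Set String) p => PySem.Set.add s p.1) PySem.Set.empty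
  -- Source B: {k: {u for kk, u in keyed if kk == k} for k in seen}
  seen.map (fun k => (k, PySem.Set.ofList ((keyed.filter (fun p => p.1 == k)).map (fun p => p.2))))

-- ===== PRECONDITION & SPEC =====
def Spec_group_urls_by_path (urls : List String) (out : List (String × List String)) : Prop := out = group_urls_by_path_alt urls
instance (urls : List String) (out : List (String × List String)) : Decidable (Spec_group_urls_by_path urls out) := by unfold Spec_group_urls_by_path; infer_instance

-- ===== CLAIM (what is proved, stated in full; the proofs are below) =====
def Claim_equal_group_urls_by_path : Prop := ∀ (urls : List String), Dom_group_urls_by_path urls → Spec_group_urls_by_path urls (group_urls_by_path urls)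

-- ===== LEMMAS AND PROOFS =====

lemma pvOfList_snoc {l : List String} {x : String} :
    PySem.Set.ofList (l ++ [x]) = PySem.Set.add (PySem.Set.ofList l) x := by
  rw [PySem.Set.ofList_eq_foldl, PySem.Set.ofList_eq_foldl, List.foldl_append]
  rfl

lemma pvAdd_eq {s : PySem.Set String} {x : String} :
    PySem.Set.add s x = if x ∈ s then s else s ++ [x] := by
  simp [PySem.Set.add, PySem.Set.contains]

lemma pvModify_eq (d : PySem.Dict String (PySem.Set String)) (k : String)
    (f : PySem.Set String → PySem.Set String) :
    d.modify k PySem.Set.empty f = d.insert k (f (d.getD k PySem.Set.empty)) := rfl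

-- Source B's `seen` loop builds exactly the ordered-dedup of the key list
lemma pvSeen_eq (us : List String) (s : PySem.Set String) :
    (us.map (fun u => (pvKey u, u))).foldl (fun (s : PySem.Set String) p => PySem.Set.add s p.1) s
      = (us.map pvKey).foldl PySem.Set.add s := by
  induction us generalizing s with
  | nil => rfl
  | cons a l ih => simp [List.foldl_cons, ih]

-- filtering the keyed pairs and projecting is filtering the urls by key
lemma pvFiltPairs (us : List String) (k : String) :
    ((us.map (fun u => (pvKey u, u))).filter (fun p => p.1 == k)).map (fun p => p.2)
      = us.filter (fun u => pvKey u == k) := by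
  induction us with
  | nil => rfl
  | cons a l ih =>
    by_cases h : pvKey a == k
    · simp [h, ih]
    · simp [h, ih]

-- Source B's comprehension, written over the ordered-dedup key list
lemma pvAltCanon (us : List String) :
    group_urls_by_path_alt us
      = (PySem.Set.ofList (us.map pvKey)).map
          (fun k => (k, PySem.Set.ofList (us.filter (fun u => pvKey u == k)))) := by
  show ((us.map (fun u => (pvKey u, u))).foldl
      (fun (s : PySem.Set String) p => PySem.Set.add s p.1) PySem.Set.empty).map
      (fun k => (k, PySem.Set.ofList
        (((us.map (fun u => (pvKey u, u))).filter (fun p => p.1 == k)).map (fun p => p.2)))) = _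
  rw [pvSeen_eq, PySem.Set.ofList_eq_foldl]
  · simp only [pvFiltPairs]
    rfl

-- === A-side loop invariant: the dict's items are exactly B's key-to-filter table ===
lemma pvMain (us : List String) :
    (us.foldl pvGroupsStep PySem.Dict.empty).items
      = (PySem.Set.ofList (us.map pvKey)).map
          (fun k => (k, PySem.Set.ofList (us.filter (fun u => pvKey u == k)))) := by
  induction us using List.reverseRecOn with
  | nil => rfl
  | append_singleton us u ih =>
    rw [List.foldl_append, List.foldl_cons, List.foldl_nil]
    set d := us.foldl pvGroupsStep PySem.Dict.empty with hd
    have hkeys : d.keys = PySem.Set.ofList (us.map pvKey) := by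
      simp only [PySem.Dict.keys, ih, List.map_map]
      simp [Function.comp_def]
    have hnd : d.keys.Nodup := by rw [hkeys]; exact PySem.Set.nodup_ofList _
    by_cases hk : pvKey u ∈ us.map pvKey
    · -- key already present
      have hcont : d.contains (pvKey u) = true := by
        rw [PySem.Dict.contains_eq_decide_mem_keys, hkeys]
        simp [PySem.Set.mem_ofList, hk]
      have hmemit : (pvKey u,
          PySem.Set.ofList (us.filter (fun u' => pvKey u' == pvKey u))) ∈ d.items := by
        rw [ih]
        exact List.mem_map.mpr ⟨pvKey u, (PySem.Set.mem_ofList _ _).mpr hk, rfl⟩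
      have hv : d.getD (pvKey u) PySem.Set.empty
          = PySem.Set.ofList (us.filter (fun u' => pvKey u' == pvKey u)) :=
        PySem.Dict.getD_of_mem_items _ hmemit hnd _
      rw [show pvGroupsStep d u
            = d.modify (pvKey u) PySem.Set.empty (fun s => PySem.Set.add s u) by
          simp [pvGroupsStep, hcont]]
      rw [pvModify_eq, PySem.Dict.items_insert_of_contains d _ hcont, ih]
      have hkeys' : PySem.Set.ofList ((us ++ [u]).map pvKey)
          = PySem.Set.ofList (us.map pvKey) := by
        rw [List.map_append, List.map_singleton, pvOfList_snoc, pvAdd_eq]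
        simp [PySem.Set.mem_ofList, hk]
      rw [hkeys', List.map_map]
      apply List.map_congr_left
      intro k hkL
      by_cases hku : k = pvKey u
      · subst hku
        simp only [Function.comp_apply, beq_self_eq_true, hv]
        have hflt : (us ++ [u]).filter (fun u' => pvKey u' == pvKey u)
            = us.filter (fun u' => pvKey u' == pvKey u) ++ [u] := by
          simp [List.filter_append]
        rw [hflt, pvOfList_snoc, pvAdd_eq]
        by_cases hmem : u ∈ PySem.Set.ofList (us.filter (fun u' => pvKey u' == pvKey u))
        · simp [hmem]
        · simp [hmem]
      · have hbe : (k == pvKey u) = false := by simp [hku]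
        simp only [Function.comp_apply, hbe]
        have hflt : (us ++ [u]).filter (fun u' => pvKey u' == k)
            = us.filter (fun u' => pvKey u' == k) := by
          simp [List.filter_append, Ne.symm hku]
        rw [hflt]
        simp
    · -- fresh key
      have hcont : d.contains (pvKey u) = false := by
        rw [PySem.Dict.contains_eq_decide_mem_keys, hkeys]
        simp [PySem.Set.mem_ofList, hk]
      rw [show pvGroupsStep d u
            = (d.insert (pvKey u) PySem.Set.empty).modify (pvKey u) PySem.Set.empty
                (fun s => PySem.Set.add s u) by
          simp [pvGroupsStep, hcont]]
      rw [pvModify_eq, PySem.Dict.getD_insert_self, PySem.Dict.insert_insert_self,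
        PySem.Dict.items_insert_of_not_contains d _ hcont, ih]
      have hkeys' : PySem.Set.ofList ((us ++ [u]).map pvKey)
          = PySem.Set.ofList (us.map pvKey) ++ [pvKey u] := by
        rw [List.map_append, List.map_singleton, pvOfList_snoc, pvAdd_eq]
        simp [PySem.Set.mem_ofList, hk]
      rw [hkeys', List.map_append, List.map_singleton]
      congr 1
      · apply List.map_congr_left
        intro k hkL
        have hku : k ≠ pvKey u := by
          intro h; subst h
          exact hk ((PySem.Set.mem_ofList _ _).mp hkL)
        have hflt : (us ++ [u]).filter (fun u' => pvKey u' == k)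
            = us.filter (fun u' => pvKey u' == k) := by
          simp [List.filter_append, Ne.symm hku]
        rw [hflt]
      · have hfil : us.filter (fun u' => pvKey u' == pvKey u) = [] := by
          rw [List.filter_eq_nil_iff]
          intro u' hu'
          simp only [beq_iff_eq]
          intro h
          exact hk (h ▸ List.mem_map_of_mem hu')
        have hflt : (us ++ [u]).filter (fun u' => pvKey u' == pvKey u) = [u] := by
          simp [List.filter_append, hfil]
        rw [hflt]
        rfl

-- ===== VERDICT (by name: the statement is the Claim_ definition above) =====
theorem group_urls_by_path_spec : Claim_equal_group_urls_by_path := by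
  intro urls _
  unfold Spec_group_urls_by_path group_urls_by_path
  rw [pvAltCanon]
  exact pvMain urls
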